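-- pv_equiv track=rewrite | github.com/NomadBuilder/DarkAI | app.py | _parse_forwarded_host
-- ===== SOURCE A (Python) =====
-- def _parse_forwarded_host(forwarded):
--     """Extract host from Forwarded: host=\"...\" header if present."""
--     if not forwarded:
--         return None
--     for part in forwarded.split(";"):
--         part = part.strip().lower()
--         if part.startswith("host="):
--             v = part[5:].strip('"')
--             return v
--     return None
-- ===== SOURCE B (Python) =====
-- def _parse_forwarded_host(forwarded):
--     """Extract host from Forwarded: host="..." header if present."""
--     if not forwarded:
--         return None
--     d = {}
--     for part in forwarded.split(";"):
--         p = part.strip().lower()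
--         if "=" in p:
--             k, v = p.split("=", 1)
--             d.setdefault(k, v)
--     v = d.get("host")
--     return v.strip('"') if v is not None else None
-- ===== Notes on version B (the rewrite author's own statement) =====
-- stated objective: idiomatic
-- what changed: Replaces the early-return scan for a part starting with 'host=' by a build-then-lookup: parse every 'key=value' part into a first-wins dict (setdefault) and fetch 'host' afterwards.
import Mathlib
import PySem

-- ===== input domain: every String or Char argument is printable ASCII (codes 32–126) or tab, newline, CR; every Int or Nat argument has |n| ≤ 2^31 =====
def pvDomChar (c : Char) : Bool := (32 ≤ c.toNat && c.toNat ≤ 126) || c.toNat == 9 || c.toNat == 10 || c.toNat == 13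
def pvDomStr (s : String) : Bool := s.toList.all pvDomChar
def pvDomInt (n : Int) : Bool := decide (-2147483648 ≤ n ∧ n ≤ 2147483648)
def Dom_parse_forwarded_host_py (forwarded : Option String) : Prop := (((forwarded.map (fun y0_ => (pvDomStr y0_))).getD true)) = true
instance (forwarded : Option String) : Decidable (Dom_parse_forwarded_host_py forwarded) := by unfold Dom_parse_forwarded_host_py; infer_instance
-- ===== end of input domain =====

-- B replaces A's early-return scan for a part starting with "host=" by the idiomatic
-- build-then-lookup: parse all "key=value" parts into a first-wins dict, then fetch "host".

-- ===== PORT A =====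
-- p = part.strip().lower(), shared by both loops
def pvNorm (part : List Char) : List Char := PySem.Chars.lower (PySem.Chars.strip part)

-- the for-loop with its early return; strings handled as List Char via PySem.Chars
def pvLoopA : List (List Char) → Option String
  | [] => none
  | part :: rest =>
    if PySem.Chars.startswith (pvNorm part) "host=".toList then
      some (String.ofList (PySem.Chars.stripChars (PySem.Chars.slice (pvNorm part) (some 5) none) ['"']))
    else pvLoopA rest

def parse_forwarded_host_py (forwarded : Option String) : Option String :=
  match forwarded with
  | none => none
  | some s =>
    if s = "" then none           -- `if not forwarded`
    else pvLoopA (PySem.Chars.splitOn s.toList [';'])   -- s.split(";"): exact, sep is nonempty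

-- ===== PORT B =====
-- one loop iteration: p.split("=", 1) and d.setdefault(k, v); split('=',1) with the
-- literal nonempty sep always yields exactly two pieces when '=' is in p, so the
-- wildcard branch of the match is unreachable (Python's tuple unpacking never raises here)
def pvStepB (d : PySem.Dict (List Char) (List Char)) (part : List Char) :
    PySem.Dict (List Char) (List Char) :=
  if PySem.Chars.isIn ['='] (pvNorm part) then
    match PySem.Chars.splitMax? (pvNorm part) ['='] 1 with
    | some (k :: v :: _) => d.setdefault k v
    | _ => d
  else d

def parse_forwarded_host_py_alt (forwarded : Option String) : Option String :=
  match forwarded with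
  | none => none
  | some s =>
    if s = "" then none           -- `if not forwarded`
    else
      match ((PySem.Chars.splitOn s.toList [';']).foldl pvStepB PySem.Dict.empty).get? "host".toList with
      | some v => some (String.ofList (PySem.Chars.stripChars v ['"']))
      | none => none

-- ===== PRECONDITION & SPEC =====
def Spec_parse_forwarded_host_py (forwarded : Option String) (out : Option String) : Prop := out = parse_forwarded_host_py_alt forwarded
instance (forwarded : Option String) (out : Option String) : Decidable (Spec_parse_forwarded_host_py forwarded out) := by unfold Spec_parse_forwarded_host_py; infer_instance

-- ===== CLAIM (what is proved, stated in full; the proofs are below) =====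
def Claim_equal_parse_forwarded_host_py : Prop := ∀ (forwarded : Option String), Dom_parse_forwarded_host_py forwarded → Spec_parse_forwarded_host_py forwarded (parse_forwarded_host_py forwarded)

-- ===== LEMMAS AND PROOFS =====

-- splitOnMax.go with maxsplit exhausted returns the rest as the final piece
theorem pv_go_zero (sep : List Char) (fuel : Nat) (l cur : List Char)
    (acc : List (List Char)) :
    PySem.Chars.splitOnMax.go sep fuel 0 l cur acc = ((cur.reverse ++ l) :: acc).reverse := by
  cases fuel with
  | zero => simp [PySem.Chars.splitOnMax.go]
  | succ n => cases l <;> simp [PySem.Chars.splitOnMax.go]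

-- splitOnMax.go with maxsplit = 1 and sep "=": split at the first '=' if any
theorem pv_go_one (fuel : Nat) (l cur : List Char) (acc : List (List Char))
    (hf : l.length < fuel) :
    PySem.Chars.splitOnMax.go ['='] fuel 1 l cur acc =
      if '=' ∈ l then
        acc.reverse ++ [cur.reverse ++ l.takeWhile (· ≠ '='), (l.dropWhile (· ≠ '=')).drop 1]
      else acc.reverse ++ [cur.reverse ++ l] := by
  induction fuel generalizing l cur acc with
  | zero => omega
  | succ n ih =>
    cases l with
    | nil => simp [PySem.Chars.splitOnMax.go]
    | cons c rest =>
      by_cases hc : c = '='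
      · subst hc
        simp [PySem.Chars.splitOnMax.go, List.isPrefixOf, pv_go_zero]
      · have h1 : List.isPrefixOf ['='] (c :: rest) = false := by
          simp [List.isPrefixOf]; exact fun h => absurd h.symm hc
        have h2 : rest.length < n := by simpa using hf
        simp only [PySem.Chars.splitOnMax.go, h1]
        rw [ih rest (c :: cur) acc h2]
        by_cases hm : '=' ∈ rest <;> simp [hm, hc, Ne.symm hc]

-- p.split("=", 1) characterised
theorem pv_splitMax_one (p : List Char) :
    PySem.Chars.splitMax? p ['='] 1 =
      some (if '=' ∈ p then
              [p.takeWhile (· ≠ '='), (p.dropWhile (· ≠ '=')).drop 1]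
            else [p]) := by
  unfold PySem.Chars.splitMax? PySem.Chars.splitOnMax
  rw [if_neg (by simp), if_neg (by omega)]
  simp only [Int.toNat_one]
  rw [pv_go_one p.length.succ p [] [] (by omega)]
  split <;> simp

theorem pv_head_of_eq_cons {α : Type} (l : List α) (a : α) (t : List α) (hd : l = a :: t) (hw : l ≠ []) : l.head hw = a := by
  cases hd; rfl

-- "host=" is a prefix of p  ↔  '=' ∈ p and the part of p before the first '=' is "host"
theorem pv_key_host (p : List Char) :
    "host=".toList <+: p ↔ '=' ∈ p ∧ p.takeWhile (· ≠ '=') = "host".toList := by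
  constructor
  · rintro ⟨t, ht⟩
    subst ht
    refine ⟨by simp, ?_⟩
    rw [show "host=".toList = ['h', 'o', 's', 't', '='] from rfl]
    simp only [List.cons_append]
    repeat rw [List.takeWhile_cons_of_pos (by decide)]
    rw [List.takeWhile_cons_of_neg (by decide)]
    rfl
  · rintro ⟨hmem, htake⟩
    have hsplit := List.takeWhile_append_dropWhile (p := (· ≠ '=')) (l := p)
    have hdmem : '=' ∈ p.dropWhile (· ≠ '=') := by
      have hm2 : '=' ∈ p.takeWhile (· ≠ '=') ++ p.dropWhile (· ≠ '=') := by
        rw [hsplit]; exact hmem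
      rcases List.mem_append.mp hm2 with h | h
      · exact absurd (List.mem_takeWhile_imp h) (by simp)
      · exact h
    obtain ⟨a, t, hd⟩ : ∃ a t, p.dropWhile (· ≠ '=') = a :: t := by
      cases hdrop : p.dropWhile (· ≠ '=') with
      | nil => rw [hdrop] at hdmem; simp at hdmem
      | cons a t => exact ⟨a, t, rfl⟩
    have ha : a = '=' := by
      have hw : List.dropWhile (fun x => decide (x ≠ '=')) p ≠ [] := by rw [hd]; simp
      have := List.head_dropWhile_not (fun x => decide (x ≠ '=')) hw
      have hh : (List.dropWhile (fun x => decide (x ≠ '=')) p).head hw = a :=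
        pv_head_of_eq_cons _ a t hd hw
      rw [hh] at this
      simpa using this
    refine ⟨t, ?_⟩
    conv_rhs => rw [← hsplit]
    rw [htake, hd, ha]
    rfl

-- the value after the first '=' equals p[5:] when p starts with "host="
theorem pv_val_host (p : List Char) (h : "host=".toList <+: p) :
    (p.dropWhile (· ≠ '=')).drop 1 = p.drop 5 := by
  obtain ⟨t, ht⟩ := h
  subst ht
  rw [show "host=".toList = ['h', 'o', 's', 't', '='] from rfl]
  simp only [List.cons_append]
  repeat rw [List.dropWhile_cons_of_pos (by decide)]
  rw [List.dropWhile_cons_of_neg (by decide)]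
  rfl

-- once "host" is in the dict, the rest of the fold never changes its value
theorem pv_fold_keeps (parts : List (List Char)) (d : PySem.Dict (List Char) (List Char))
    (v : List Char) (h : d.get? "host".toList = some v) :
    ((parts.foldl pvStepB d).get? "host".toList) = some v := by
  induction parts generalizing d with
  | nil => simpa using h
  | cons part rest ih =>
    rw [List.foldl_cons]
    apply ih
    unfold pvStepB
    split
    · split
      · rename_i k v' tail heq
        by_cases hk : "host".toList = k
        · subst hk
          rw [PySem.Dict.get?_setdefault_self, h]
          rfl
        · rw [PySem.Dict.get?_setdefault_of_ne _ _ hk]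
          exact h
      · exact h
    · exact h

-- main invariant: starting from a dict without "host", the fold-then-lookup
-- computes exactly what A's early-return scan returns
theorem pv_loop_eq (parts : List (List Char)) (d : PySem.Dict (List Char) (List Char))
    (h : d.get? "host".toList = none) :
    (match (parts.foldl pvStepB d).get? "host".toList with
     | some v => some (String.ofList (PySem.Chars.stripChars v ['"']))
     | none => none) = pvLoopA parts := by
  induction parts generalizing d with
  | nil => simp only [List.foldl_nil, h, pvLoopA]
  | cons part rest ih =>
    rw [List.foldl_cons]
    by_cases hsw : PySem.Chars.startswith (pvNorm part) "host=".toList = true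
    · have hpre : "host=".toList <+: pvNorm part :=
        (PySem.Chars.startswith_iff (pvNorm part) _).mp hsw
      have hmem : '=' ∈ pvNorm part := ((pv_key_host _).mp hpre).1
      have htake : (pvNorm part).takeWhile (· ≠ '=') = "host".toList := ((pv_key_host _).mp hpre).2
      have hstep : pvStepB d part = d.setdefault "host".toList ((pvNorm part).drop 5) := by
        unfold pvStepB
        rw [if_pos (by
          rw [PySem.Chars.isIn_iff_infix]
          exact (List.singleton_infix_iff '=' (pvNorm part)).mpr hmem)]
        rw [pv_splitMax_one, if_pos hmem, htake, pv_val_host _ hpre]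
      have hget : (pvStepB d part).get? "host".toList = some ((pvNorm part).drop 5) := by
        rw [hstep, PySem.Dict.get?_setdefault_self, h]
        rfl
      rw [pv_fold_keeps rest _ _ hget]
      have hslice : PySem.Chars.slice (pvNorm part) (some 5) none = (pvNorm part).drop 5 := by
        simp [pysem]
      simp only [pvLoopA, hsw, if_true, hslice]
    · have hnpre : ¬ "host=".toList <+: pvNorm part :=
        fun hc => hsw ((PySem.Chars.startswith_iff (pvNorm part) _).mpr hc)
      have hstep : (pvStepB d part).get? "host".toList = none := by
        unfold pvStepB
        split
        · next hin =>
          have hmem : '=' ∈ pvNorm part := by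
            rw [PySem.Chars.isIn_iff_infix] at hin
            exact (List.singleton_infix_iff '=' (pvNorm part)).mp hin
          rw [pv_splitMax_one, if_pos hmem]
          have hk : "host".toList ≠ (pvNorm part).takeWhile (· ≠ '=') := by
            intro hc
            exact hnpre ((pv_key_host _).mpr ⟨hmem, hc.symm⟩)
          rw [PySem.Dict.get?_setdefault_of_ne _ _ hk]
          exact h
        · exact h
      rw [ih (pvStepB d part) hstep]
      simp only [pvLoopA]
      rw [if_neg hsw]

-- ===== VERDICT (by name: the statement is the Claim_ definition above) =====
theorem parse_forwarded_host_py_spec : Claim_equal_parse_forwarded_host_py := by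
  intro forwarded _
  unfold Spec_parse_forwarded_host_py
  cases forwarded with
  | none => rfl
  | some s =>
    unfold parse_forwarded_host_py parse_forwarded_host_py_alt
    by_cases hs : s = ""
    · simp [hs]
    · simp only [hs, if_false]
      exact (pv_loop_eq _ PySem.Dict.empty (by simp [pysem])).symm
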